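-- pv_equiv track=rewrite | github.com/ziyouandsuixin/multi-layer-network-epidemic-control | experiments/our_model_adapter.py | _convert_to_time_series
-- ===== SOURCE A (Python) =====
-- def _convert_to_time_series(state_evolution):
--     """将状态演化转换为时间序列格式"""
--     time_series = {'S': [], 'I': [], 'R': []}
--
--     for states in state_evolution:
--         s_count = sum(1 for state in states.values() if state.get('state') == 'S')
--         i_count = sum(1 for state in states.values() if state.get('state') == 'I')
--         r_count = sum(1 for state in states.values() if state.get('state') == 'R')
--
--         time_series['S'].append(s_count)
--         time_series['I'].append(i_count)
--         time_series['R'].append(r_count)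
--
--     return time_series
-- ===== SOURCE B (Python) =====
-- def _convert_to_time_series(state_evolution):
--     """Per timestep build one dict tally of all state values, then read the
--     three series off the tallies by lookup with default 0."""
--     tallies = []
--     for states in state_evolution:
--         tally = {}
--         for state in states.values():
--             k = state.get('state')
--             tally[k] = tally.get(k, 0) + 1
--         tallies.append(tally)
--     return {k: [t.get(k, 0) for t in tallies] for k in ('S', 'I', 'R')}
-- ===== Notes on version B (the rewrite author's own statement) =====
-- stated objective: alternative
-- what changed: Replaces A's three independent scans per timestep with one dict tally counting every state value per timestep, the three series then being read off the tallies by lookup with default 0.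
import Mathlib
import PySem

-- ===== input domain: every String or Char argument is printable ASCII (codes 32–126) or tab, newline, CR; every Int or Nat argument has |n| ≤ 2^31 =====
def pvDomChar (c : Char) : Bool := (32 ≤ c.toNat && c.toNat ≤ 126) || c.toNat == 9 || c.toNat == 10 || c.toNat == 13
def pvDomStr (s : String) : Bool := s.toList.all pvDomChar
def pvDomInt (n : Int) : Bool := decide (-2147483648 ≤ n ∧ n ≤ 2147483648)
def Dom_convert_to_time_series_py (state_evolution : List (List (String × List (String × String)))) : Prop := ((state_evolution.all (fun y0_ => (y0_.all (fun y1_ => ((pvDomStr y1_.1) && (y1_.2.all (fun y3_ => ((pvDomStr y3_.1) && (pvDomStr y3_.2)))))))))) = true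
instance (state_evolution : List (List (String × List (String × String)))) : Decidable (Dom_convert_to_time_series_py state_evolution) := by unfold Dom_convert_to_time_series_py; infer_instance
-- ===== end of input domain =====

-- B builds one dict tally of all state values per timestep and reads the three series off the tallies by lookup (objective: alternative).


-- shared primitive: dict.get(k) on an association list (first match), as both Pythons call it
def pvDictGet (d : List (String × String)) (k : String) : Option String :=
  match d with
  | [] => none
  | (a, b) :: t => if a == k then some b else pvDictGet t k

-- ===== PORT A =====
-- sum(1 for state in states.values() if state.get('state') == tgt)
def pvCountState (states : List (String × List (String × String))) (tgt : String) : Int :=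
  states.foldl (fun n kv => if pvDictGet kv.2 "state" = some tgt then n + 1 else n) 0

def convert_to_time_series_py (state_evolution : List (List (String × List (String × String)))) : List (String × List Int) :=
  let r := state_evolution.foldl
    (fun acc states =>
      let s_count := pvCountState states "S"
      let i_count := pvCountState states "I"
      let r_count := pvCountState states "R"
      (acc.1 ++ [s_count], acc.2.1 ++ [i_count], acc.2.2 ++ [r_count]))
    (([] : List Int), ([] : List Int), ([] : List Int))
  [("S", r.1), ("I", r.2.1), ("R", r.2.2)]

-- ===== PORT B =====
-- tally = {}; for state in states.values(): k = state.get('state'); tally[k] = tally.get(k, 0) + 1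
def pvTally (states : List (String × List (String × String))) : PySem.Dict (Option String) Int :=
  states.foldl
    (fun tally kv =>
      tally.insert (pvDictGet kv.2 "state") (tally.getD (pvDictGet kv.2 "state") 0 + 1))
    PySem.Dict.empty

-- return {k: [t.get(k, 0) for t in tallies] for k in ('S', 'I', 'R')}
def convert_to_time_series_py_alt (state_evolution : List (List (String × List (String × String)))) : List (String × List Int) :=
  let tallies := state_evolution.map pvTally
  ["S", "I", "R"].map (fun k => (k, tallies.map (fun t => t.getD (some k) 0)))

-- ===== PRECONDITION & SPEC =====
def Spec_convert_to_time_series_py (state_evolution : List (List (String × List (String × String)))) (out : List (String × List Int)) : Prop := out = convert_to_time_series_py_alt state_evolution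
instance (state_evolution : List (List (String × List (String × String)))) (out : List (String × List Int)) : Decidable (Spec_convert_to_time_series_py state_evolution out) := by unfold Spec_convert_to_time_series_py; infer_instance

-- ===== CLAIM =====
def Claim_equal_convert_to_time_series_py : Prop := ∀ (state_evolution : List (List (String × List (String × String)))), Dom_convert_to_time_series_py state_evolution → Spec_convert_to_time_series_py state_evolution (convert_to_time_series_py state_evolution)

-- ===== LEMMAS AND PROOFS =====

-- A's counting fold from n equals from 0 plus n
theorem count_shift_foldl (t : List (String × List (String × String))) (tgt : String) (n : Int) :
    t.foldl (fun n kv => if pvDictGet kv.2 "state" = some tgt then n + 1 else n) n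
      = n + t.foldl (fun n kv => if pvDictGet kv.2 "state" = some tgt then n + 1 else n) 0 := by
  induction t generalizing n with
  | nil => simp
  | cons h t ih =>
      simp only [List.foldl_cons]
      by_cases hc : pvDictGet h.2 "state" = some tgt
      · rw [if_pos hc, if_pos hc, ih (n + 1), ih (0 + 1)]; ring
      · rw [if_neg hc, if_neg hc, ih n]


-- the count of tgt among the mapped keys is A's counting fold
theorem count_map_eq_foldl (states : List (String × List (String × String))) (tgt : String) :
    ((states.map (fun kv => pvDictGet kv.2 "state")).count (some tgt) : Int)
      = states.foldl (fun n kv => if pvDictGet kv.2 "state" = some tgt then n + 1 else n) 0 := by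
  induction states with
  | nil => simp
  | cons h t ih =>
      simp only [List.map_cons, List.count_cons, List.foldl_cons]
      by_cases hc : pvDictGet h.2 "state" = some tgt
      · rw [if_pos hc, count_shift_foldl]
        simp [hc, ← ih]; ring
      · rw [if_neg hc, ← ih]
        simp [hc]

-- B's tally, looked up at some tgt with default 0, is exactly A's count of tgt
theorem pvTally_getD (states : List (String × List (String × String))) (tgt : String) :
    (pvTally states).getD (some tgt) 0 = pvCountState states tgt := by
  unfold pvTally pvCountState
  have hmap := List.foldl_map (f := fun kv : String × List (String × String) => pvDictGet kv.2 "state")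
    (g := fun (d : PySem.Dict (Option String) Int) k => d.insert k (d.getD k 0 + 1))
    (l := states) (init := PySem.Dict.empty)
  rw [← hmap, PySem.Dict.getD_foldl_insert_add_one, PySem.Dict.getD_empty,
      count_map_eq_foldl]
  ring

-- A's accumulating fold, from an arbitrary start, appends the per-timestep counts
theorem foldA_eq (se : List (List (String × List (String × String)))) (a b c : List Int) :
    se.foldl
      (fun acc states =>
        (acc.1 ++ [pvCountState states "S"], acc.2.1 ++ [pvCountState states "I"],
          acc.2.2 ++ [pvCountState states "R"]))
      (a, b, c)
    = (a ++ se.map (fun s => pvCountState s "S"), b ++ se.map (fun s => pvCountState s "I"),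
        c ++ se.map (fun s => pvCountState s "R")) := by
  induction se generalizing a b c with
  | nil => simp
  | cons h t ih => simp [List.foldl_cons, ih]

-- ===== VERDICT =====
theorem convert_to_time_series_py_spec : Claim_equal_convert_to_time_series_py := by
  intro se _
  unfold Spec_convert_to_time_series_py convert_to_time_series_py convert_to_time_series_py_alt
  simp only [foldA_eq, List.nil_append, List.map_cons, List.map_nil, List.map_map]
  simp [Function.comp, pvTally_getD]
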